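-- pv_equiv track=rewrite | github.com/XUNZI1314/ML | pocket_io.py | _extract_first_model_lines
-- ===== SOURCE A (Python) =====
-- def _record_name(line: str) -> str:
--     """Return uppercase PDB record name from one line."""
--     return line[:6].strip().upper()
--
-- def _extract_first_model_lines(lines: list[str]) -> list[str]:
--     """Extract first MODEL block from PDB text.
--
--     If no explicit MODEL record exists, the input lines are returned as-is.
--     """
--     selected: list[str] = []
--     saw_model = False
--     in_first_model = False
--
--     for raw_line in lines:
--         record = _record_name(raw_line)
--         if record == "MODEL":
--             if not saw_model:
--                 saw_model = True
--                 in_first_model = True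
--             else:
--                 break
--             continue
--
--         if record == "ENDMDL":
--             if in_first_model:
--                 break
--             continue
--
--         if saw_model and not in_first_model:
--             continue
--
--         selected.append(raw_line.rstrip("\r\n"))
--
--     return selected
-- ===== SOURCE B (Python) =====
-- def _record_name(line: str) -> str:
--     """Return uppercase PDB record name from one line."""
--     return line[:6].strip().upper()
--
--
-- def _extract_first_model_lines(lines: list[str]) -> list[str]:
--     """Extract first MODEL block from PDB text.
--
--     Locate the first MODEL record, then build the result from two plain
--     passes: the preamble before it (ENDMDL records skipped, as stray
--     ENDMDLs are ignored) and the block after it up to the next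
--     MODEL/ENDMDL record.
--     """
--     start = next((i for i, l in enumerate(lines) if _record_name(l) == "MODEL"), None)
--     if start is None:
--         return [l.rstrip("\r\n") for l in lines if _record_name(l) != "ENDMDL"]
--     out = [l.rstrip("\r\n") for l in lines[:start] if _record_name(l) != "ENDMDL"]
--     for l in lines[start + 1:]:
--         if _record_name(l) in ("MODEL", "ENDMDL"):
--             break
--         out.append(l.rstrip("\r\n"))
--     return out
-- ===== Notes on version B (the rewrite author's own statement) =====
-- stated objective: simpler
-- what changed: Replaced A's single-pass state machine with saw_model/in_first_model Boolean flags by a locate step (index of first MODEL record) followed by two plain passes: a filtered comprehension over the preamble and a take-until loop over the lines after the MODEL record.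
import Mathlib
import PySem

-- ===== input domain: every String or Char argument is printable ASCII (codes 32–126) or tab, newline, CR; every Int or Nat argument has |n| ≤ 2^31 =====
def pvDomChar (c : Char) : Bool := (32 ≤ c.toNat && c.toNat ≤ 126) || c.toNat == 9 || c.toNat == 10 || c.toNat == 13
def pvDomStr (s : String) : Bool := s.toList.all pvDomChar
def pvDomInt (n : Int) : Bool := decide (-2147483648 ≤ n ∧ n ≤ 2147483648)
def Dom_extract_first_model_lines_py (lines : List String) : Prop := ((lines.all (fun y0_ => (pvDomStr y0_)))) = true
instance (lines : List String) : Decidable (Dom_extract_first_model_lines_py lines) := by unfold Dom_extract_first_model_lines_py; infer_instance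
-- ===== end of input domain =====

-- B replaces A's one-pass flag state machine (saw_model/in_first_model) by a locate-then-two-passes
-- decomposition: find the first MODEL record, filter/rstrip the preamble, then take the block after it
-- up to the next MODEL/ENDMDL (objective: simpler — the two Boolean flags disappear).


-- shared helper `_record_name` (both Pythons call it): line[:6].strip().upper()
def recName (line : String) : String :=
  PySem.Str.upper (PySem.Str.strip (PySem.Str.slice line none (some 6)))

-- l.rstrip("\r\n"): hand port, exact — Python removes exactly the trailing run of chars in {'\r','\n'}
def rstripCRLF (line : String) : String :=
  String.ofList ((line.toList.reverse.dropWhile (fun c => c = '\r' || c = '\n')).reverse)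

-- ===== PORT A =====
-- A's for-loop with break/continue and state (selected, saw_model, in_first_model)
def loopA : List String → List String → Bool → Bool → List String
  | [], selected, _, _ => selected
  | raw_line :: rest, selected, saw_model, in_first_model =>
    -- record := _record_name(raw_line), inlined
    if recName raw_line = "MODEL" then
      if !saw_model then loopA rest selected true true
      else selected                                   -- break
    else if recName raw_line = "ENDMDL" then
      if in_first_model then selected                 -- break
      else loopA rest selected saw_model in_first_model
    else if saw_model && !in_first_model then loopA rest selected saw_model in_first_model
    else loopA rest (selected ++ [rstripCRLF raw_line]) saw_model in_first_model

def extract_first_model_lines_py (lines : List String) : List String :=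
  loopA lines [] false false

-- ===== PORT B =====
-- next((i for i, l in enumerate(lines) if _record_name(l) == "MODEL"), None)
def findModel : List String → Nat → Option Nat
  | [], _ => none
  | l :: rest, i => if recName l = "MODEL" then some i else findModel rest (i + 1)

-- [l.rstrip("\r\n") for l in xs if _record_name(l) != "ENDMDL"]
def altPre (xs : List String) : List String :=
  (xs.filter (fun l => recName l != "ENDMDL")).map rstripCRLF

-- the for-loop over lines[start+1:] with its break
def altBody : List String → List String
  | [] => []
  | l :: rest =>
    if recName l = "MODEL" ∨ recName l = "ENDMDL" then []
    else rstripCRLF l :: altBody rest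

def extract_first_model_lines_py_alt (lines : List String) : List String :=
  match findModel lines 0 with
  | none => altPre lines
  | some start =>
      altPre (PySem.List.slice lines none (some (start : Int))) ++
        altBody (PySem.List.slice lines (some ((start : Int) + 1)) none)

-- ===== PRECONDITION & SPEC =====
def Spec_extract_first_model_lines_py (lines : List String) (out : List String) : Prop := out = extract_first_model_lines_py_alt lines
instance (lines : List String) (out : List String) : Decidable (Spec_extract_first_model_lines_py lines out) := by unfold Spec_extract_first_model_lines_py; infer_instance

-- ===== CLAIM (what is proved, stated in full; the proofs are below) =====
def Claim_equal_extract_first_model_lines_py : Prop := ∀ (lines : List String), Dom_extract_first_model_lines_py lines → Spec_extract_first_model_lines_py lines (extract_first_model_lines_py lines)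

-- ===== LEMMAS AND PROOFS =====

theorem findModel_shift (xs : List String) (i : Nat) :
    findModel xs (i + 1) = (findModel xs i).map (· + 1) := by
  induction xs generalizing i with
  | nil => rfl
  | cons l rest ih =>
      simp only [findModel]
      split <;> simp [ih]

theorem altPre_cons_skip (l : String) (xs : List String) (h : recName l = "ENDMDL") :
    altPre (l :: xs) = altPre xs := by
  simp [altPre, List.filter_cons, h]

theorem altPre_cons_keep (l : String) (xs : List String) (h : recName l ≠ "ENDMDL") :
    altPre (l :: xs) = rstripCRLF l :: altPre xs := by
  simp [altPre, List.filter_cons, h]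

-- A's loop in the saw_model = in_first_model = true state is exactly B's body loop
theorem loopA_true (xs : List String) (sel : List String) :
    loopA xs sel true true = sel ++ altBody xs := by
  induction xs generalizing sel with
  | nil => simp [loopA, altBody]
  | cons l rest ih =>
      by_cases hm : recName l = "MODEL"
      · simp [loopA, altBody, hm]
      · by_cases he : recName l = "ENDMDL"
        · simp [loopA, altBody, hm, he]
        · simp [loopA, altBody, hm, he, ih]

-- B's result expressed with take/drop (the slices reduce to these)
def altRes (xs : List String) : List String :=
  match findModel xs 0 with
  | none => altPre xs
  | some s => altPre (xs.take s) ++ altBody (xs.drop (s + 1))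

theorem altRes_cons_model (l : String) (rest : List String) (hm : recName l = "MODEL") :
    altRes (l :: rest) = altBody rest := by
  have hf : findModel (l :: rest) 0 = some 0 := by rw [findModel, if_pos hm]
  unfold altRes
  rw [hf]
  simp [altPre]

theorem altRes_cons_skip (l : String) (rest : List String)
    (hm : ¬ recName l = "MODEL") (he : recName l = "ENDMDL") :
    altRes (l :: rest) = altRes rest := by
  have hf : findModel (l :: rest) 0 = (findModel rest 0).map (· + 1) := by
    rw [findModel, if_neg hm]; exact findModel_shift rest 0
  unfold altRes
  rw [hf]
  cases hfr : findModel rest 0 with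
  | none => simp [altPre_cons_skip l rest he]
  | some s => simp [altPre_cons_skip l _ he, List.take_succ_cons, List.drop_succ_cons]

theorem altRes_cons_keep (l : String) (rest : List String)
    (hm : ¬ recName l = "MODEL") (he : ¬ recName l = "ENDMDL") :
    altRes (l :: rest) = rstripCRLF l :: altRes rest := by
  have hf : findModel (l :: rest) 0 = (findModel rest 0).map (· + 1) := by
    rw [findModel, if_neg hm]; exact findModel_shift rest 0
  unfold altRes
  rw [hf]
  cases hfr : findModel rest 0 with
  | none => simp [altPre_cons_keep l rest he]
  | some s => simp [altPre_cons_keep l _ he, List.take_succ_cons, List.drop_succ_cons]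

-- A's loop from the initial state equals B's locate-then-two-passes result
theorem loopA_false (xs : List String) (sel : List String) :
    loopA xs sel false false = sel ++ altRes xs := by
  induction xs generalizing sel with
  | nil => simp [loopA, altRes, findModel, altPre]
  | cons l rest ih =>
      by_cases hm : recName l = "MODEL"
      · rw [loopA, if_pos hm]
        show loopA rest sel true true = sel ++ altRes (l :: rest)
        rw [altRes_cons_model l rest hm]
        exact loopA_true rest sel
      · by_cases he : recName l = "ENDMDL"
        · rw [loopA, if_neg hm, if_pos he]
          show loopA rest sel false false = sel ++ altRes (l :: rest)
          rw [altRes_cons_skip l rest hm he]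
          exact ih sel
        · rw [loopA, if_neg hm, if_neg he]
          show loopA rest (sel ++ [rstripCRLF l]) false false = sel ++ altRes (l :: rest)
          rw [altRes_cons_keep l rest hm he, ih]
          simp

theorem alt_eq_altRes (lines : List String) :
    extract_first_model_lines_py_alt lines = altRes lines := by
  unfold extract_first_model_lines_py_alt altRes
  cases hf : findModel lines 0 with
  | none => rfl
  | some s =>
      have h1 : PySem.List.slice lines none (some (s : Int)) = lines.take s :=
        PySem.List.slice_to_natCast lines s
      have h2 : PySem.List.slice lines (some ((s : Int) + 1)) none = lines.drop (s + 1) := by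
        have : ((s : Int) + 1) = ((s + 1 : Nat) : Int) := by push_cast; ring
        rw [this]
        exact PySem.List.slice_from_natCast lines (s + 1)
      simp only [h1, h2]

-- ===== VERDICT (by name: the statement is the Claim_ definition above) =====
theorem extract_first_model_lines_py_spec : Claim_equal_extract_first_model_lines_py := by
  intro lines _
  unfold Spec_extract_first_model_lines_py extract_first_model_lines_py
  rw [loopA_false, alt_eq_altRes]
  simp
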